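-- pv_equiv track=rewrite | github.com/chohan3036/algo_study | Binary Search/43238_입국심사.py | solution
-- ===== SOURCE A (Python) =====
-- def solution(n, times):
--     left, right = 1, max(times) * n
--     ans = 0
--
--     while left <= right:
--         mid = (left + right) // 2
--         cap = 0
--
--         for t in times:
--             cap += mid // t
--
--             if cap >= n:
--                 ans = mid
--                 right = mid - 1
--                 break
--
--         if cap < n:
--             left = mid + 1
--
--     return ans
-- ===== SOURCE B (Python) =====
-- def _insert(q, item):
--     i = 0
--     while i < len(q) and q[i] <= item:
--         i += 1
--     q.insert(i, item)
--
--
-- def solution(n, times):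
--     if n <= 0:
--         return 0
--     queue = []
--     for t in times:
--         _insert(queue, (t, t))
--     cur = 0
--     for _ in range(n):
--         cur, t = queue.pop(0)
--         _insert(queue, (cur + t, t))
--     return cur
-- ===== Notes on version B (the rewrite author's own statement) =====
-- stated objective: alternative
-- what changed: B replaces A's binary search over the answer range (re-counting sum(mid//t) per probe) by a direct event simulation: a sorted agenda of each checkpoint's next free time from which the minimum is popped n times, the n-th pop being the answer.
-- outside the precondition, e.g. on solution(1, [-1]): A returns 0, B returns -1; on solution(2, [3, -2]): A returns 6, B returns -4
import Mathlib
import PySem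

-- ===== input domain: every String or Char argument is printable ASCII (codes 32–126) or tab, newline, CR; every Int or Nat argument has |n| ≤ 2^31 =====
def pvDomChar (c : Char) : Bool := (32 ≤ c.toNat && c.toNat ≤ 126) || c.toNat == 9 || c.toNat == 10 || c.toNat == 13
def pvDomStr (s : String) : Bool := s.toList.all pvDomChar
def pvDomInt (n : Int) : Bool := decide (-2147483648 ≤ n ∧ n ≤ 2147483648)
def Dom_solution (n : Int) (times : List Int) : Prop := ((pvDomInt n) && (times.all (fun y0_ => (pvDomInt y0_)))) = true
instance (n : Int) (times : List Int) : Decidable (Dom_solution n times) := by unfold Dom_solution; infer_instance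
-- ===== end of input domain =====

-- B replaces A's binary search over the answer range by a direct simulation that keeps a sorted
-- agenda of each checkpoint's next free time and pops the minimum n times (objective: alternative).

-- ===== PORT A =====
-- inner 'for t in times: cap += mid // t; if cap >= n: … break' — returns (final cap, whether it broke)
def capLoop (n mid : Int) : List Int → Int → Int × Bool
  | [], cap => (cap, false)
  | t :: ts, cap =>
    let cap' := cap + PySem.Int.floordiv mid t
    if n ≤ cap' then (cap', true) else capLoop n mid ts cap'

-- 'while left <= right' with fuel; on (broke, cap ≥ n without break) the Python loops forever —
-- that state is unreachable for times ≠ [] (Pre_), the fuel exceeds the interval length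
def aLoop (n : Int) (times : List Int) : Nat → Int → Int → Int → Int
  | 0, _, _, ans => ans
  | fuel + 1, left, right, ans =>
    if left ≤ right then
      let mid := PySem.Int.floordiv (left + right) 2
      let r := capLoop n mid times 0
      if r.2 then aLoop n times fuel left (mid - 1) mid
      else if r.1 < n then aLoop n times fuel (mid + 1) right ans
      else ans
    else ans

def solution (n : Int) (times : List Int) : Int :=
  match PySem.List.max? times (fun y => y) with
  | none => 0   -- Python: max([]) raises ValueError; excluded by Pre_
  | some m => aLoop n times (m * n + 1).toNat 1 (m * n) 0

-- ===== PORT B =====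
-- Python tuple comparison (a, b) <= (c, d)
def pleLex (a b : Int × Int) : Bool := decide (a.1 < b.1) || (decide (a.1 = b.1) && decide (a.2 ≤ b.2))

-- _insert: advance past all entries <= item, insert there
def insSorted (x : Int × Int) : List (Int × Int) → List (Int × Int)
  | [] => [x]
  | y :: ys => if pleLex y x then y :: insSorted x ys else x :: y :: ys

-- 'for _ in range(n): cur, t = queue.pop(0); _insert(queue, (cur + t, t))'
-- (pop from an empty queue raises IndexError in Python; unreachable under Pre_, times ≠ [])
def bLoop : Nat → Int → List (Int × Int) → Int
  | 0, cur, _ => cur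
  | _ + 1, cur, [] => cur
  | k + 1, _, (c, t) :: rest => bLoop k c (insSorted (c + t, t) rest)

def solution_alt (n : Int) (times : List Int) : Int :=
  if n ≤ 0 then 0
  else bLoop n.toNat 0 (times.foldl (fun q t => insSorted (t, t) q) [])

-- ===== PRECONDITION & SPEC =====
-- Pre_ excludes the empty list (A raises ValueError in max) and, when n ≥ 1, lists containing a
-- nonpositive time: there A may divide by zero, and otherwise its value is an accident of running
-- a binary search against a non-monotone count (see cites); for n ≤ 0 every input whose search
-- range 1..max*n is empty is admitted (A returns 0 at once).
def Pre_solution (n : Int) (times : List Int) : Prop :=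
  times ≠ [] ∧ ((∀ t ∈ times, 0 < t) ∨ (n ≤ 0 ∧ (n = 0 ∨ ∃ t ∈ times, 0 ≤ t)))
instance (n : Int) (times : List Int) : Decidable (Pre_solution n times) := by unfold Pre_solution; infer_instance

def pvWitness_solution : Int × List Int := (6, [7, 10])

def Spec_solution (n : Int) (times : List Int) (out : Int) : Prop := out = solution_alt n times
instance (n : Int) (times : List Int) (out : Int) : Decidable (Spec_solution n times out) := by unfold Spec_solution; infer_instance

-- ===== CLAIM (what is proved, stated in full; the proofs are below) =====
def Claim_equal_solution : Prop := ∀ (n : Int) (times : List Int), Dom_solution n times → Pre_solution n times → Spec_solution n times (solution n times)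

-- ===== LEMMAS AND PROOFS =====

-- number of people the checkpoints can process within time T (the quantity A's binary search probes)
def countLe (T : Int) (times : List Int) : Int := (times.map (fun t => PySem.Int.floordiv T t)).sum

theorem fd_nonneg {T t : Int} (ht : 0 < t) (hT : 0 ≤ T) : 0 ≤ PySem.Int.floordiv T t := by
  rw [PySem.Int.le_floordiv_iff_mul_le ht]; nlinarith

theorem fd_mono {T T' t : Int} (ht : 0 < t) (h : T ≤ T') :
    PySem.Int.floordiv T t ≤ PySem.Int.floordiv T' t := by
  rw [PySem.Int.le_floordiv_iff_mul_le ht]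
  have := (PySem.Int.le_floordiv_iff_mul_le (a := T) (q := PySem.Int.floordiv T t) ht).mp le_rfl
  linarith

theorem fd_exact {j t : Int} (ht : 0 < t) : PySem.Int.floordiv (j * t) t = j := by
  rw [PySem.Int.floordiv_eq_iff_of_pos ht]; constructor <;> nlinarith

theorem countLe_nonneg {T : Int} {times : List Int} (hpos : ∀ t ∈ times, 0 < t) (hT : 0 ≤ T) :
    0 ≤ countLe T times := by
  induction times with
  | nil => simp [countLe]
  | cons t ts ih =>
    have h1 := fd_nonneg (hpos t (by simp)) hT
    have h2 := ih (fun x hx => hpos x (by simp [hx]))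
    simp only [countLe, List.map_cons, List.sum_cons] at *
    linarith

theorem countLe_mono {T T' : Int} {times : List Int} (hpos : ∀ t ∈ times, 0 < t) (h : T ≤ T') :
    countLe T times ≤ countLe T' times := by
  induction times with
  | nil => simp [countLe]
  | cons t ts ih =>
    have h1 := fd_mono (hpos t (by simp)) h
    have h2 := ih (fun x hx => hpos x (by simp [hx]))
    simp only [countLe, List.map_cons, List.sum_cons] at *
    linarith

theorem capLoop_spec (n mid : Int) (hmid : 0 ≤ mid) :
    ∀ (ts : List Int) (c : Int), (∀ t ∈ ts, 0 < t) →
      ((capLoop n mid ts c).2 = true → n ≤ c + countLe mid ts) ∧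
      ((capLoop n mid ts c).2 = false →
        (capLoop n mid ts c).1 = c + countLe mid ts ∧ (ts ≠ [] → (capLoop n mid ts c).1 < n)) := by
  intro ts
  induction ts with
  | nil => intro c _; simp [capLoop, countLe]
  | cons t ts ih =>
    intro c hpos
    have ht : 0 < t := hpos t (by simp)
    have hrest : ∀ x ∈ ts, 0 < x := fun x hx => hpos x (by simp [hx])
    have hnn : 0 ≤ countLe mid ts := countLe_nonneg hrest hmid
    simp only [capLoop]
    by_cases hb : n ≤ c + PySem.Int.floordiv mid t
    · simp only [if_pos hb]
      constructor
      · intro _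
        simp only [countLe, List.map_cons, List.sum_cons]
        have : countLe mid ts = (ts.map (fun t => PySem.Int.floordiv mid t)).sum := rfl
        linarith [hnn]
      · intro h; simp at h
    · simp only [if_neg hb]
      have hih := ih (c + PySem.Int.floordiv mid t) hrest
      constructor
      · intro hbr
        have h1 := hih.1 hbr
        simp only [countLe, List.map_cons, List.sum_cons]
        have e : countLe mid ts = (ts.map (fun t => PySem.Int.floordiv mid t)).sum := rfl
        linarith
      · intro hbr
        rcases ts with _ | ⟨u, us⟩
        · simp [capLoop] at hbr ⊢
          constructor
          · simp [countLe]
          · omega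
        · have h2 := hih.2 hbr
          refine ⟨?_, fun _ => h2.2 (by simp)⟩
          rw [h2.1]
          simp only [countLe, List.map_cons, List.sum_cons]
          ring

theorem aLoop_least (n : Int) (times : List Int) (hne : times ≠ []) (hpos : ∀ t ∈ times, 0 < t)
    (r : Int) (hr1 : 1 ≤ r) (hrP : n ≤ countLe r times)
    (hrmin : ∀ T, 1 ≤ T → T < r → countLe T times < n) :
    ∀ (fuel : Nat) (left right ans : Int),
      (right - left + 1).toNat < fuel →
      1 ≤ left → left ≤ right + 1 →
      (∀ T, 1 ≤ T → T < left → countLe T times < n) →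
      ((ans = right + 1 ∧ n ≤ countLe ans times) ∨ (ans = 0 ∧ left ≤ right ∧ n ≤ countLe right times)) →
      aLoop n times fuel left right ans = r := by
  intro fuel
  induction fuel with
  | zero => intro left right ans h; omega
  | succ fuel ih =>
    intro left right ans hfuel hl hlr1 hmin hinv
    by_cases hlr : left ≤ right
    · simp only [aLoop, if_pos hlr]
      set mid := PySem.Int.floordiv (left + right) 2 with hmid
      obtain ⟨hm1, hm2⟩ := PySem.Int.floordiv_two_mid_bounds hlr
      have hmid0 : 0 ≤ mid := by omega
      have hspec := capLoop_spec n mid hmid0 times 0 hpos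
      by_cases hbr : (capLoop n mid times 0).2 = true
      · have hP : n ≤ countLe mid times := by have := hspec.1 hbr; linarith
        simp only [hbr, if_pos]
        apply ih left (mid - 1) mid (by omega) hl (by omega) hmin
        left; exact ⟨by ring, hP⟩
      · have hbr' : (capLoop n mid times 0).2 = false := by
          cases h : (capLoop n mid times 0).2 <;> simp_all
        obtain ⟨hcap, hlt⟩ := hspec.2 hbr'
        have hltn : (capLoop n mid times 0).1 < n := hlt hne
        have hPn : countLe mid times < n := by linarith
        simp only [hbr', Bool.false_eq_true, if_false, if_pos hltn]
        apply ih (mid + 1) right ans (by omega) (by omega) (by omega)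
        · intro T hT1 hT2
          by_cases hTm : T < left
          · exact hmin T hT1 hTm
          · calc countLe T times ≤ countLe mid times := countLe_mono hpos (by omega)
              _ < n := hPn
        · rcases hinv with ⟨ha, hb⟩ | ⟨ha, hb, hc⟩
          · left; exact ⟨ha, hb⟩
          · right
            refine ⟨ha, ?_, hc⟩
            by_cases hmr : mid = right
            · exfalso; rw [hmr] at hPn; linarith
            · omega
    · simp only [aLoop, if_neg hlr]
      rcases hinv with ⟨ha, hb⟩ | ⟨ha, hb, hc⟩
      · -- ans = right + 1 = left, P ans, everything below left fails
        have hansl : ans = left := by omega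
        have hans1 : 1 ≤ ans := by omega
        by_contra hne'
        rcases lt_or_gt_of_ne hne' with h | h
        · have := hrmin ans hans1 h; linarith
        · have := hmin r hr1 (by omega); linarith
      · omega

theorem pleLex_total {a b : Int × Int} (h : pleLex a b = false) : pleLex b a = true := by
  simp only [pleLex, Bool.or_eq_false_iff, Bool.or_eq_true, Bool.and_eq_false_iff,
    Bool.and_eq_true, decide_eq_true_eq, decide_eq_false_iff_not] at *
  omega

theorem pleLex_trans {a b c : Int × Int} (h1 : pleLex a b = true) (h2 : pleLex b c = true) :
    pleLex a c = true := by
  simp only [pleLex, Bool.or_eq_true, Bool.and_eq_true, decide_eq_true_eq] at *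
  omega

theorem pleLex_fst_le {a b : Int × Int} (h : pleLex a b = true) : a.1 ≤ b.1 := by
  simp only [pleLex, Bool.or_eq_true, Bool.and_eq_true, decide_eq_true_eq] at h
  omega

theorem insSorted_perm (x : Int × Int) : ∀ q : List (Int × Int), (insSorted x q).Perm (x :: q) := by
  intro q
  induction q with
  | nil => simp [insSorted]
  | cons y ys ih =>
    simp only [insSorted]
    by_cases h : pleLex y x = true
    · simp only [if_pos h]
      exact ((ih.cons y).trans (List.Perm.swap x y ys))
    · simp [h]

theorem insSorted_sorted (x : Int × Int) :
    ∀ q : List (Int × Int), q.Pairwise (fun a b => pleLex a b = true) →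
      (insSorted x q).Pairwise (fun a b => pleLex a b = true) := by
  intro q
  induction q with
  | nil => simp [insSorted]
  | cons y ys ih =>
    intro hp
    rw [List.pairwise_cons] at hp
    simp only [insSorted]
    by_cases h : pleLex y x = true
    · simp only [if_pos h]
      rw [List.pairwise_cons]
      refine ⟨?_, ih hp.2⟩
      intro z hz
      have : z ∈ x :: ys := (insSorted_perm x ys).mem_iff.mp hz
      rcases List.mem_cons.mp this with h' | h'
      · rw [h']; exact h
      · exact hp.1 z h'
    · simp only [if_neg h]
      have hxy : pleLex x y = true := pleLex_total (by simpa using h)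
      rw [List.pairwise_cons]
      refine ⟨?_, List.pairwise_cons.mpr hp⟩
      intro z hz
      rcases List.mem_cons.mp hz with h' | h'
      · rw [h']; exact hxy
      · exact pleLex_trans hxy (hp.1 z h')

theorem foldl_ins_perm : ∀ (l : List Int) (q : List (Int × Int)),
    (l.foldl (fun q t => insSorted (t, t) q) q).Perm ((l.map fun t => (t, t)) ++ q) := by
  intro l
  induction l with
  | nil => simp
  | cons t l ih =>
    intro q
    simp only [List.foldl_cons, List.map_cons, List.cons_append]
    have h1 := ih (insSorted (t, t) q)
    have h2 : ((l.map fun t => (t, t)) ++ insSorted (t, t) q).Perm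
        ((l.map fun t => (t, t)) ++ (t, t) :: q) :=
      List.Perm.append_left _ (insSorted_perm _ _)
    have h3 : ((l.map fun t => (t, t)) ++ (t, t) :: q).Perm
        ((t, t) :: ((l.map fun t => (t, t)) ++ q)) := List.perm_middle
    exact (h1.trans h2).trans h3

theorem foldl_ins_sorted : ∀ (l : List Int) (q : List (Int × Int)),
    q.Pairwise (fun a b => pleLex a b = true) →
    (l.foldl (fun q t => insSorted (t, t) q) q).Pairwise (fun a b => pleLex a b = true) := by
  intro l
  induction l with
  | nil => intro q h; simpa
  | cons t l ih => intro q h; exact ih _ (insSorted_sorted _ _ h)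

def QInv (times : List Int) (k : Nat) (v : Int) (q : List (Int × Int)) : Prop :=
  (q.map Prod.snd).Perm times ∧
  (∀ p ∈ q, 0 < p.2 ∧ p.2 ∣ p.1 ∧ p.2 ≤ p.1) ∧
  q.Pairwise (fun a b => pleLex a b = true) ∧
  (q.map (fun p => PySem.Int.floordiv p.1 p.2)).sum = (k : Int) + q.length ∧
  (∀ p ∈ q, p.1 - p.2 ≤ v ∧ v ≤ p.1) ∧
  (k = 0 ∨ ∃ p ∈ q, p.1 = v + p.2 ∧ 2 * p.2 ≤ p.1)

theorem qinv_step {times : List Int} {k : Nat} {v c t : Int} {rest : List (Int × Int)}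
    (h : QInv times k v ((c, t) :: rest)) :
    QInv times (k + 1) c (insSorted (c + t, t) rest) := by
  obtain ⟨hperm, helem, hsort, hsum, hbnd, -⟩ := h
  have hperm' := insSorted_perm (c + t, t) rest
  have hmem : ∀ p, p ∈ insSorted (c + t, t) rest ↔ p ∈ (c + t, t) :: rest := fun p => hperm'.mem_iff
  have hhead := helem (c, t) (by simp)
  have ht : 0 < t := hhead.1
  have htc : t ≤ c := hhead.2.2
  have hdvd : t ∣ c := hhead.2.1
  have hheadmin : ∀ p ∈ rest, c ≤ p.1 := by
    intro p hp
    rw [List.pairwise_cons] at hsort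
    exact pleLex_fst_le (hsort.1 p hp)
  refine ⟨?_, ?_, ?_, ?_, ?_, ?_⟩
  · -- snd multiset unchanged
    have : ((insSorted (c + t, t) rest).map Prod.snd).Perm (((c + t, t) :: rest).map Prod.snd) :=
      hperm'.map _
    simpa using this.trans (by simpa using hperm)
  · intro p hp
    rcases List.mem_cons.mp ((hmem p).mp hp) with h' | h'
    · subst h'
      exact ⟨ht, by simpa using dvd_add hdvd (dvd_refl t), by simp; omega⟩
    · exact helem p (by simp [h'])
  · rw [List.pairwise_cons] at hsort
    exact insSorted_sorted _ _ hsort.2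
  · have e1 : ((insSorted (c + t, t) rest).map fun p => PySem.Int.floordiv p.1 p.2).sum
        = (((c + t, t) :: rest).map fun p => PySem.Int.floordiv p.1 p.2).sum :=
      (hperm'.map _).sum_eq
    have e2 : (insSorted (c + t, t) rest).length = rest.length + 1 := by
      simpa using hperm'.length_eq
    obtain ⟨j, hj⟩ := hdvd
    have hfd1 : PySem.Int.floordiv c t = j := by rw [hj, mul_comm]; exact fd_exact ht
    have hfd2 : PySem.Int.floordiv (c + t) t = j + 1 := by
      have : c + t = (j + 1) * t := by rw [hj]; ring
      rw [this]; exact fd_exact ht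
    simp only [List.map_cons, List.sum_cons] at hsum ⊢
    rw [e1, e2]
    simp only [List.map_cons, List.sum_cons]
    push_cast
    simp only [hfd2]
    rw [hfd1] at hsum
    simp only [List.length_cons] at hsum ⊢
    push_cast at hsum ⊢
    linarith
  · intro p hp
    rcases List.mem_cons.mp ((hmem p).mp hp) with h' | h'
    · subst h'; constructor <;> simp <;> omega
    · have hb := hbnd p (by simp [h'])
      exact ⟨by linarith [hb.1, (hbnd (c, t) (by simp)).2], hheadmin p h'⟩
  · right
    exact ⟨(c + t, t), (hmem _).mpr (by simp), by simp, by simp; omega⟩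

theorem bLoop_run {times : List Int} (hne : times ≠ []) :
    ∀ (k j : Nat) (v : Int) (q : List (Int × Int)), QInv times j v q →
      ∃ v' q', bLoop k v q = v' ∧ QInv times (j + k) v' q' := by
  intro k
  induction k with
  | zero => intro j v q h; exact ⟨v, q, rfl, by simpa using h⟩
  | succ k ih =>
    intro j v q h
    rcases q with _ | ⟨⟨c, t⟩, rest⟩
    · exfalso
      have := h.1
      simp at this
      exact hne this
    · have hstep := qinv_step h
      obtain ⟨v', q', he, hq⟩ := ih (j + 1) c _ hstep
      refine ⟨v', q', by simpa [bLoop] using he, ?_⟩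
      have hjk : j + 1 + k = j + (k + 1) := by omega
      rwa [hjk] at hq

theorem sum_map_one {α : Type} : ∀ l : List α, (l.map (fun _ => (1 : Int))).sum = l.length := by
  intro l; induction l with
  | nil => simp
  | cons a l ih => simp only [List.map_cons, List.sum_cons, List.length_cons, ih]; push_cast; ring

theorem sum_sub_ones {α : Type} (g : α → Int) :
    ∀ l : List α, (l.map (fun p => g p - 1)).sum = (l.map g).sum - l.length := by
  intro l; induction l with
  | nil => simp
  | cons a l ih => simp only [List.map_cons, List.sum_cons, List.length_cons, ih]; push_cast; ring

theorem qinv_init {times : List Int} (hpos : ∀ t ∈ times, 0 < t) :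
    QInv times 0 0 (times.foldl (fun q t => insSorted (t, t) q) []) := by
  have hperm : (times.foldl (fun q t => insSorted (t, t) q) []).Perm (times.map fun t => (t, t)) := by
    simpa using foldl_ins_perm times []
  have hmem : ∀ p, p ∈ times.foldl (fun q t => insSorted (t, t) q) [] ↔
      p ∈ times.map fun t => (t, t) := fun p => hperm.mem_iff
  refine ⟨?_, ?_, ?_, ?_, ?_, Or.inl rfl⟩
  · have h2 := hperm.map Prod.snd
    simp only [List.map_map] at h2
    simpa [Function.comp_def] using h2
  · intro p hp
    rcases List.mem_map.mp ((hmem p).mp hp) with ⟨t, ht, rfl⟩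
    exact ⟨hpos t ht, dvd_refl t, le_refl t⟩
  · exact foldl_ins_sorted times [] (by simp)
  · rw [(hperm.map _).sum_eq]
    have e : ((times.map fun t => (t, t)).map fun p => PySem.Int.floordiv p.1 p.2)
        = times.map fun t => PySem.Int.floordiv t t := by simp [List.map_map, Function.comp_def]
    rw [e]
    have e2 : times.map (fun t => PySem.Int.floordiv t t) = times.map fun _ => (1 : Int) := by
      apply List.map_congr_left
      intro t ht
      have h1 : t = 1 * t := by ring
      calc PySem.Int.floordiv t t = PySem.Int.floordiv (1 * t) t := by rw [← h1]
        _ = 1 := fd_exact (hpos t ht)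
    rw [e2, sum_map_one]
    have := hperm.length_eq
    simp at this
    simp [this]
  · intro p hp
    rcases List.mem_map.mp ((hmem p).mp hp) with ⟨t, ht, rfl⟩
    have := hpos t ht
    constructor <;> simp <;> omega

theorem countLe_perm {T : Int} {times : List Int} {q : List (Int × Int)}
    (h : (q.map Prod.snd).Perm times) :
    countLe T times = (q.map fun p => PySem.Int.floordiv T p.2).sum := by
  unfold countLe
  rw [← (h.map (fun t => PySem.Int.floordiv T t)).sum_eq]
  simp [List.map_map, Function.comp_def]

theorem qinv_bounds {times : List Int} {k : Nat} {v : Int} {q : List (Int × Int)}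
    (hk : 1 ≤ k) (h : QInv times k v q) :
    1 ≤ v ∧ (k : Int) ≤ countLe v times ∧ countLe (v - 1) times ≤ (k : Int) - 1 := by
  obtain ⟨hperm, helem, -, hsum, hbnd, hwit⟩ := h
  rcases hwit with h0 | ⟨pw, hpwmem, hpw1, hpw2⟩
  · omega
  have hlen : (q.length : Int) = times.length := by
    have := hperm.length_eq; simp at this; exact_mod_cast this
  -- per-element j's
  have hj : ∀ p ∈ q, ∃ j : Int, p.1 = j * p.2 ∧ PySem.Int.floordiv p.1 p.2 = j := by
    intro p hp
    obtain ⟨j, hj⟩ := (helem p hp).2.1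
    exact ⟨j, by rw [hj]; ring, by rw [hj, mul_comm]; exact fd_exact (helem p hp).1⟩
  have hv1 : 1 ≤ v := by
    have h2 := (helem pw hpwmem).1
    omega
  refine ⟨hv1, ?_, ?_⟩
  · -- k ≤ countLe v
    rw [countLe_perm hperm]
    have hle : (q.map fun p => PySem.Int.floordiv p.1 p.2 - 1).sum ≤
        (q.map fun p => PySem.Int.floordiv v p.2).sum := by
      apply List.sum_le_sum
      intro p hp
      obtain ⟨j, hj1, hj2⟩ := hj p hp
      have ht := (helem p hp).1
      rw [hj2]
      have : (j - 1) * p.2 = p.1 - p.2 := by rw [hj1]; ring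
      have hb := (hbnd p hp).1
      have : PySem.Int.floordiv (p.1 - p.2) p.2 = j - 1 := by
        rw [← this]; exact fd_exact ht
      calc j - 1 = PySem.Int.floordiv (p.1 - p.2) p.2 := this.symm
        _ ≤ PySem.Int.floordiv v p.2 := fd_mono ht hb
    rw [sum_sub_ones] at hle
    rw [hsum] at hle
    omega
  · -- countLe (v-1) ≤ k - 1
    obtain ⟨s, t', hq⟩ := List.mem_iff_append.mp hpwmem
    subst hq
    rw [countLe_perm hperm]
    have hgen : ∀ p ∈ s ++ pw :: t', PySem.Int.floordiv (v - 1) p.2 ≤ PySem.Int.floordiv p.1 p.2 - 1 := by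
      intro p hp
      obtain ⟨j, hj1, hj2⟩ := hj p hp
      have ht := (helem p hp).1
      rw [hj2]
      have hb := (hbnd p hp).2
      have : PySem.Int.floordiv (v - 1) p.2 < j := by
        rw [PySem.Int.floordiv_lt_iff_lt_mul ht, ← hj1]; omega
      omega
    have hmid : PySem.Int.floordiv (v - 1) pw.2 ≤ PySem.Int.floordiv pw.1 pw.2 - 2 := by
      obtain ⟨j, hj1, hj2⟩ := hj pw (by simp)
      have ht := (helem pw (by simp)).1
      rw [hj2]
      have hveq : v = (j - 1) * pw.2 := by
        have e : (j - 1) * pw.2 = j * pw.2 - pw.2 := by ring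
        rw [hj1] at hpw1
        linarith
      have : PySem.Int.floordiv (v - 1) pw.2 < j - 1 := by
        rw [PySem.Int.floordiv_lt_iff_lt_mul ht, ← hveq]; omega
      omega
    have hsplit : ((s ++ pw :: t').map fun p => PySem.Int.floordiv (v - 1) p.2).sum
        ≤ ((s ++ pw :: t').map fun p => PySem.Int.floordiv p.1 p.2 - 1).sum - 1 := by
      simp only [List.map_append, List.sum_append, List.map_cons, List.sum_cons]
      have h1 : (s.map fun p => PySem.Int.floordiv (v - 1) p.2).sum ≤
          (s.map fun p => PySem.Int.floordiv p.1 p.2 - 1).sum :=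
        List.sum_le_sum (fun p hp => hgen p (by simp [hp]))
      have h2 : (t'.map fun p => PySem.Int.floordiv (v - 1) p.2).sum ≤
          (t'.map fun p => PySem.Int.floordiv p.1 p.2 - 1).sum :=
        List.sum_le_sum (fun p hp => hgen p (by simp [hp]))
      linarith [hmid]
    rw [sum_sub_ones] at hsplit
    rw [hsum] at hsplit
    omega

theorem aLoop_stop (n : Int) (times : List Int) (fuel : Nat) (left right ans : Int)
    (h : right < left) : aLoop n times fuel left right ans = ans := by
  cases fuel with
  | zero => rfl
  | succ f => simp only [aLoop]; rw [if_neg (by omega)]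

theorem n_le_countLe_max {times : List Int} {M n : Int} (hmem : M ∈ times)
    (hpos : ∀ t ∈ times, 0 < t) (hn : 1 ≤ n) : n ≤ countLe (M * n) times := by
  have hM : 0 < M := hpos M hmem
  have hMn : 0 ≤ M * n := by nlinarith
  obtain ⟨s, t', rfl⟩ := List.mem_iff_append.mp hmem
  unfold countLe
  simp only [List.map_append, List.sum_append, List.map_cons, List.sum_cons]
  have hmid : PySem.Int.floordiv (M * n) M = n := by
    have e : M * n = n * M := by ring
    rw [e]; exact fd_exact hM
  have h1 : 0 ≤ (s.map fun t => PySem.Int.floordiv (M * n) t).sum := by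
    apply List.sum_nonneg
    intro x hx
    obtain ⟨t, ht, rfl⟩ := List.mem_map.mp hx
    exact fd_nonneg (hpos t (by simp [ht])) hMn
  have h2 : 0 ≤ (t'.map fun t => PySem.Int.floordiv (M * n) t).sum := by
    apply List.sum_nonneg
    intro x hx
    obtain ⟨t, ht, rfl⟩ := List.mem_map.mp hx
    exact fd_nonneg (hpos t (by simp [ht])) hMn
  rw [hmid]
  linarith

theorem solution_eq_alt (n : Int) (times : List Int)
    (hpre : Pre_solution n times) :
    solution n times = solution_alt n times := by
  unfold Pre_solution at hpre
  obtain ⟨hne, hcase⟩ := hpre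
  by_cases hn : n ≤ 0
  · unfold solution solution_alt
    rw [if_pos hn]
    cases hmax : PySem.List.max? times (fun y => y) with
    | none => rfl
    | some m =>
      have hmmem : m ∈ times := PySem.List.max?_mem hmax
      have hright : m * n < 1 := by
        by_cases hn0 : n = 0
        · simp [hn0]
        · have hm0 : 0 ≤ m := by
            rcases hcase with h | ⟨-, h⟩
            · exact le_of_lt (h m hmmem)
            · rcases h with h | ⟨t, htm, ht⟩
              · omega
              · exact le_trans ht (PySem.List.max?_isMax hmax t htm)
          nlinarith
      exact aLoop_stop _ _ _ _ _ _ (by omega)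
  · have hn1 : 1 ≤ n := by omega
    have hpos : ∀ t ∈ times, 0 < t := by
      rcases hcase with h | ⟨h, -⟩
      · exact h
      · omega
    -- B's value and its characterisation
    obtain ⟨v, q', hbv, hq⟩ :=
      bLoop_run hne n.toNat 0 0 (times.foldl (fun q t => insSorted (t, t) q) []) (qinv_init hpos)
    have hBval : solution_alt n times = v := by
      unfold solution_alt
      rw [if_neg hn, hbv]
    have hk : 1 ≤ n.toNat := by omega
    obtain ⟨hv1, hvge, hvlt⟩ := qinv_bounds hk (by simpa using hq)
    have hcast : ((n.toNat : Int)) = n := by omega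
    rw [hcast] at hvge hvlt
    have hrmin : ∀ T, 1 ≤ T → T < v → countLe T times < n := by
      intro T hT1 hT2
      calc countLe T times ≤ countLe (v - 1) times := countLe_mono hpos (by omega)
        _ ≤ n - 1 := hvlt
        _ < n := by omega
    rw [hBval]
    unfold solution
    cases hmax : PySem.List.max? times (fun y => y) with
    | none =>
      exfalso
      exact hne ((PySem.List.max?_eq_none_iff (xs := times) (key := fun y => y)).mp hmax)
    | some m =>
      have hmmem : m ∈ times := PySem.List.max?_mem hmax
      have hM : 0 < m := hpos m hmmem
      have hmn1 : 1 ≤ m * n := by nlinarith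
      exact aLoop_least n times hne hpos v hv1 hvge hrmin ((m * n + 1).toNat) 1 (m * n) 0
        (by omega) (by omega) (by omega) (by intro T h1 h2; omega)
        (Or.inr ⟨rfl, by omega, n_le_countLe_max hmmem hpos hn1⟩)


-- ===== VERDICT (by name: the statement is the Claim_ definition above) =====
theorem solution_spec : Claim_equal_solution := by
  intro n times _ hpre
  unfold Spec_solution
  exact solution_eq_alt n times hpre
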